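-- pv_equiv track=rewrite | github.com/megvadulthangya/manjaro-awesome | .github/scripts/modules/repo/smart_cleanup.py | parse_package_filename
-- ===== SOURCE A (Python) =====
-- from typing import List, Set, Tuple, Optional, Dict
--
-- def parse_package_filename(filename: str) -> Tuple[Optional[str], Optional[str]]:
--     """
--     Parse package name and full version (epoch:pkgver-pkgrel) from filename.
--     Returns (pkgname, version) or (None, None) on failure.
--     """
--     # Remove .pkg.tar.* suffix
--     for ext in ['.pkg.tar.zst', '.pkg.tar.xz', '.pkg.tar.gz', '.pkg.tar.bz2', '.pkg.tar.lzo']: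
--         if filename.endswith(ext):
--             base = filename[:-len(ext)]
--             break
--     else:
--         return None, None
--
--     # Remove architecture suffix
--     arch_suffixes = ['-x86_64', '-any', '-i686', '-aarch64', '-armv7h', '-armv6h']
--     for arch in arch_suffixes:
--         if base.endswith(arch):
--             base = base[:-len(arch)]
--             break
--
--     # Now split by hyphen; last part is pkgrel, second last is pkgver (may contain colon), rest is pkgname
--     parts = base.split('-')
--     if len(parts) < 3:
--         return None, None
--
--     pkgrel = parts[-1]
--     pkgver = parts[-2]
--     pkgname = '-'.join(parts[:-2])
--
--     # pkgver may contain epoch, e.g., "2:1.0". That's fine.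
--     version = f"{pkgver}-{pkgrel}"
--     return pkgname, version
-- ===== SOURCE B (Python) =====
-- _EXTS = ('.pkg.tar.zst', '.pkg.tar.xz', '.pkg.tar.gz', '.pkg.tar.bz2', '.pkg.tar.lzo')
-- _ARCHES = ('-x86_64', '-any', '-i686', '-aarch64', '-armv7h', '-armv6h')
--
--
-- def parse_package_filename(filename):
--     ext = next((e for e in _EXTS if filename.endswith(e)), None)
--     if ext is None:
--         return None, None
--     base = filename[:len(filename) - len(ext)]
--     base = next((base[:len(base) - len(a)] for a in _ARCHES if base.endswith(a)), base)
--     # Single forward pass maintaining the last three hyphen-separated fields: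
--     # name = everything before the last two fields, ver = previous field, cur = field in progress.
--     name, ver, cur, k = '', '', '', 0
--     for c in base:
--         if c == '-':
--             if k >= 2:
--                 name = name + '-' + ver
--             elif k == 1:
--                 name = ver
--             ver, cur, k = cur, '', k + 1
--         else:
--             cur += c
--     if k < 2:
--         return None, None
--     return name, ver + '-' + cur
-- ===== Notes on version B (the rewrite author's own statement) =====
-- stated objective: alternative
-- what changed: Replaces A's split-into-a-parts-list / join(parts[:-2]) pipeline with a single forward fold over the base string that maintains an accumulator of the last three hyphen-separated fields (name-so-far, previous field, current field) and a separator count, never materializing the list of parts.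
import Mathlib
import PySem

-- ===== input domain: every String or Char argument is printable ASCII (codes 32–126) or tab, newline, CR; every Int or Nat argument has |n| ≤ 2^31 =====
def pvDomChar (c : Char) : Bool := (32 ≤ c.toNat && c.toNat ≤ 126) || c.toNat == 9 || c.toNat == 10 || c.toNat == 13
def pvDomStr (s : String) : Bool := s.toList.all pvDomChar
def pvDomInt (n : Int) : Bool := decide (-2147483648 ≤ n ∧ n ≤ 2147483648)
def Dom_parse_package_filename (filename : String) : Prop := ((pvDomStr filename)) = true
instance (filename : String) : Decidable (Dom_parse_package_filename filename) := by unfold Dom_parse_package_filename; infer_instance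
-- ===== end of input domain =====

-- B replaces A's split-by-hyphen/join pipeline by a single forward fold over the base string
-- maintaining the last three hyphen-separated fields in an accumulator (alternative decomposition, same cost).

def pvExts : List (List Char) :=
  [".pkg.tar.zst".toList, ".pkg.tar.xz".toList, ".pkg.tar.gz".toList,
   ".pkg.tar.bz2".toList, ".pkg.tar.lzo".toList]

def pvArchs : List (List Char) :=
  ["-x86_64".toList, "-any".toList, "-i686".toList, "-aarch64".toList,
   "-armv7h".toList, "-armv6h".toList]

-- ===== PORT A =====
-- A's for/else over extensions: first suffix hit strips via filename[:-len(ext)]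
def pvStripExtA (filename : List Char) : List (List Char) → Option (List Char)
  | [] => none
  | e :: rest =>
    if PySem.Chars.endswith filename e then
      some (PySem.List.slice filename none (some (-(e.length : Int))))
    else pvStripExtA filename rest

-- A's arch loop: first suffix hit strips via base[:-len(arch)], otherwise base unchanged
def pvStripArchA (base : List Char) : List (List Char) → List Char
  | [] => base
  | a :: rest =>
    if PySem.Chars.endswith base a then
      PySem.List.slice base none (some (-(a.length : Int)))
    else pvStripArchA base rest

def parse_package_filename (filename : String) : Option String × Option String :=
  match pvStripExtA filename.toList pvExts with
  | none => (none, none)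
  | some base0 =>
    let base := pvStripArchA base0 pvArchs
    let parts := PySem.Chars.splitOn base ['-']
    if parts.length < 3 then (none, none)
    else
      let pkgrel := (PySem.List.pyGet? parts (-1)).getD []       -- parts[-1] (in range: length ≥ 3)
      let pkgver := (PySem.List.pyGet? parts (-2)).getD []       -- parts[-2]
      let pkgname := PySem.Chars.join ['-'] (PySem.List.slice parts none (some (-2)))
      (some (String.ofList pkgname), some (String.ofList (pkgver ++ ['-'] ++ pkgrel)))

-- ===== PORT B =====
-- B's next((e for e in _EXTS if filename.endswith(e)), None)
def pvFirstExtB (s : List Char) : List (List Char) → Option (List Char)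
  | [] => none
  | e :: rest => if PySem.Chars.endswith s e then some e else pvFirstExtB s rest

-- B's next((base[:len(base)-len(a)] for a in _ARCHES if base.endswith(a)), base)
def pvStripArchB (s : List Char) : List (List Char) → List Char
  | [] => s
  | a :: rest =>
    if PySem.Chars.endswith s a then
      PySem.List.slice s none (some ((s.length : Int) - (a.length : Int)))
    else pvStripArchB s rest

-- B's loop body: state (name, ver, cur, k)
def pvStepB (st : List Char × List Char × List Char × Nat) (c : Char) :
    List Char × List Char × List Char × Nat :=
  match st with
  | (name, ver, cur, k) =>
    if c = '-' then
      ((if 2 ≤ k then name ++ '-' :: ver else if k = 1 then ver else name), cur, [], k + 1)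
    else (name, ver, cur ++ [c], k)

def parse_package_filename_alt (filename : String) : Option String × Option String :=
  match pvFirstExtB filename.toList pvExts with
  | none => (none, none)
  | some ext =>
    let base0 := PySem.List.slice filename.toList none
                   (some ((filename.toList.length : Int) - (ext.length : Int)))
    let base := pvStripArchB base0 pvArchs
    match base.foldl pvStepB ([], [], [], 0) with
    | (name, ver, cur, k) =>
      if k < 2 then (none, none)
      else (some (String.ofList name), some (String.ofList (ver ++ '-' :: cur)))

-- ===== PRECONDITION & SPEC =====
def Spec_parse_package_filename (filename : String) (out : Option String × Option String) : Prop := out = parse_package_filename_alt filename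
instance (filename : String) (out : Option String × Option String) : Decidable (Spec_parse_package_filename filename out) := by unfold Spec_parse_package_filename; infer_instance

-- ===== CLAIM (what is proved, stated in full; the proofs are below) =====
def Claim_equal_parse_package_filename : Prop := ∀ (filename : String), Dom_parse_package_filename filename → Spec_parse_package_filename filename (parse_package_filename filename)

-- ===== LEMMAS AND PROOFS =====

-- an A-style negative-end slice is List.take (len - k) (for 1 ≤ k ≤ len)
theorem pv_slice_neg_eq {α : Type} (s : List α) (k : Nat) (hk1 : 1 ≤ k) (hk : k ≤ s.length) :
    PySem.List.slice s none (some (-(k : Int))) = List.take (s.length - k) s := by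
  simp only [PySem.List.slice, PySem.List.clampIdx]
  rw [if_pos (by omega : -(k : Int) < 0), if_neg (by omega : ¬((s.length : Int) + -(k : Int) < 0))]
  congr 1
  omega

-- a B-style (len-k)-end slice is the same take (for k ≤ len)
theorem pv_slice_sub_eq {α : Type} (s : List α) (k : Nat) (hk : k ≤ s.length) :
    PySem.List.slice s none (some ((s.length : Int) - (k : Int))) = List.take (s.length - k) s := by
  rw [PySem.List.slice_to s (by omega : (0:Int) ≤ (s.length : Int) - (k : Int))]
  congr 1
  omega

-- A's ext for/else equals B's first-match-then-slice
theorem pv_stripExt_eq (s : List Char) (L : List (List Char)) (hL : ∀ e ∈ L, e ≠ []) :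
    pvStripExtA s L = (pvFirstExtB s L).map
      (fun e => PySem.List.slice s none (some ((s.length : Int) - (e.length : Int)))) := by
  induction L with
  | nil => rfl
  | cons e rest ih =>
    simp only [pvStripExtA, pvFirstExtB]
    by_cases h : PySem.Chars.endswith s e = true
    · have hle : e.length ≤ s.length := ((PySem.Chars.endswith_iff s e).1 h).length_le
      have h1 : 1 ≤ e.length :=
        List.length_pos_of_ne_nil (hL e List.mem_cons_self)
      simp [h, pv_slice_neg_eq s e.length h1 hle, pv_slice_sub_eq s e.length hle]
    · simp [h, ih (fun x hx => hL x (List.mem_cons_of_mem _ hx))]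

theorem pv_stripArch_eq (s : List Char) (L : List (List Char)) (hL : ∀ e ∈ L, e ≠ []) :
    pvStripArchA s L = pvStripArchB s L := by
  induction L with
  | nil => rfl
  | cons a rest ih =>
    simp only [pvStripArchA, pvStripArchB]
    by_cases h : PySem.Chars.endswith s a = true
    · have hle : a.length ≤ s.length := ((PySem.Chars.endswith_iff s a).1 h).length_le
      have h1 : 1 ≤ a.length :=
        List.length_pos_of_ne_nil (hL a List.mem_cons_self)
      simp [h, pv_slice_neg_eq s a.length h1 hle, pv_slice_sub_eq s a.length hle]
    · simp [h, ih (fun x hx => hL x (List.mem_cons_of_mem _ hx))]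

-- reference single-char split and its theory
def pvMapHead (f : List Char → List Char) : List (List Char) → List (List Char)
  | [] => []
  | h :: t => f h :: t

def pvSplit : List Char → List (List Char)
  | [] => [[]]
  | x :: xs => if x = '-' then [] :: pvSplit xs else pvMapHead (x :: ·) (pvSplit xs)

theorem pvMapHead_id (l : List (List Char)) : pvMapHead (fun x => x) l = l := by
  cases l <;> rfl

theorem pvSplit_ne_nil (cs : List Char) : pvSplit cs ≠ [] := by
  induction cs with
  | nil => simp [pvSplit]
  | cons x xs ih =>
    simp only [pvSplit]
    split
    · simp
    · cases h : pvSplit xs with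
      | nil => exact absurd h ih
      | cons a b => simp [pvMapHead]

theorem pv_go_spec (fuel : Nat) :
    ∀ (l cur : List Char) (acc : List (List Char)), l.length < fuel →
      PySem.Chars.splitOn.go ['-'] fuel l cur acc
        = acc.reverse ++ pvMapHead (cur.reverse ++ ·) (pvSplit l) := by
  induction fuel with
  | zero => intro l cur acc h; omega
  | succ f ih =>
    intro l cur acc h
    cases l with
    | nil =>
      rw [PySem.Chars.splitOn.go.eq_def]
      simp [pvSplit, pvMapHead]
    | cons ch rest =>
      rw [PySem.Chars.splitOn.go.eq_def]
      by_cases hc : ch = '-'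
      · subst hc
        have hpre : List.isPrefixOf ['-'] ('-' :: rest) = true := by
          simp [List.isPrefixOf]
        simp only [hpre, if_pos]
        rw [show List.drop (['-'] : List Char).length ('-' :: rest) = rest from rfl]
        rw [ih rest [] (cur.reverse :: acc) (by simp at h ⊢; omega)]
        simp only [pvSplit, reduceIte]
        cases hr : pvSplit rest with
        | nil => simp [pvMapHead]
        | cons a b => simp [pvMapHead]
      · have hpre : List.isPrefixOf ['-'] (ch :: rest) = false := by
          simp [List.isPrefixOf]
          exact fun hh => absurd hh.symm hc
        simp only [hpre, Bool.false_eq_true, if_false]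
        rw [ih rest (ch :: cur) acc (by simp at h ⊢; omega)]
        simp only [pvSplit, if_neg hc]
        cases hr : pvSplit rest with
        | nil => simp [pvMapHead]
        | cons a b => simp [pvMapHead]

theorem pv_splitOn_eq (cs : List Char) :
    PySem.Chars.splitOn cs ['-'] = pvSplit cs := by
  show PySem.Chars.splitOn.go ['-'] (cs.length + 1) cs [] [] = pvSplit cs
  rw [pv_go_spec (cs.length + 1) cs [] [] (by omega)]
  simp [pvMapHead_id]

theorem pvMapHead_append (f : List Char → List Char) (a b : List (List Char)) (ha : a ≠ []) :
    pvMapHead f (a ++ b) = pvMapHead f a ++ b := by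
  cases a with
  | nil => exact absurd rfl ha
  | cons h t => simp [pvMapHead]

theorem pvSplit_append (u v : List Char) :
    pvSplit (u ++ '-' :: v) = pvSplit u ++ pvSplit v := by
  induction u with
  | nil => simp [pvSplit]
  | cons x xs ih =>
    by_cases hx : x = '-'
    · simp [pvSplit, hx, ih]
    · simp only [List.cons_append, pvSplit, if_neg hx, ih]
      rw [pvMapHead_append _ _ _ (pvSplit_ne_nil xs)]

-- map over the LAST element
def pvMapLast (f : List Char → List Char) : List (List Char) → List (List Char)
  | [] => []
  | [x] => [f x]
  | x :: y :: t => x :: pvMapLast f (y :: t)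

theorem pvSplit_snoc_sep (l : List Char) : pvSplit (l ++ ['-']) = pvSplit l ++ [[]] := by
  have := pvSplit_append l []
  simpa [pvSplit] using this

theorem pvSplit_snoc (l : List Char) (c : Char) (hc : c ≠ '-') :
    pvSplit (l ++ [c]) = pvMapLast (· ++ [c]) (pvSplit l) := by
  induction l with
  | nil => simp [pvSplit, if_neg hc, pvMapHead, pvMapLast]
  | cons x xs ih =>
    by_cases hx : x = '-'
    · subst hx
      simp only [List.cons_append, pvSplit, reduceIte, ih]
      cases h : pvSplit xs with
      | nil => exact absurd h (pvSplit_ne_nil xs)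
      | cons a b => simp [pvMapLast]
    · simp only [List.cons_append, pvSplit, if_neg hx, ih]
      cases h : pvSplit xs with
      | nil => exact absurd h (pvSplit_ne_nil xs)
      | cons a b =>
        cases b with
        | nil => simp [pvMapHead, pvMapLast]
        | cons b1 b2 => simp [pvMapHead, pvMapLast]

theorem pvMapLast_reverse (f : List Char → List Char) (fs : List (List Char)) :
    (pvMapLast f fs).reverse = pvMapHead f fs.reverse := by
  induction fs with
  | nil => rfl
  | cons x t ih =>
    cases t with
    | nil => simp [pvMapLast, pvMapHead]
    | cons y t2 =>
      have h1 : (pvMapLast f (x :: y :: t2)).reverse = (pvMapLast f (y :: t2)).reverse ++ [x] := by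
        simp [pvMapLast]
      have h2 : (x :: y :: t2).reverse = (y :: t2).reverse ++ [x] := by simp
      rw [h1, ih, h2, pvMapHead_append f _ [x] (by simp)]

theorem pv_join_snoc (a : List (List Char)) (b : List Char) (ha : a ≠ []) :
    PySem.Chars.join ['-'] (a ++ [b]) = PySem.Chars.join ['-'] a ++ '-' :: b := by
  induction a with
  | nil => exact absurd rfl ha
  | cons x t ih =>
    cases t with
    | nil => simp [PySem.Chars.join_singleton, PySem.Chars.join_cons_cons]
    | cons y t2 =>
      have ih' := ih (by simp)
      simp only [List.cons_append] at ih' ⊢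
      rw [PySem.Chars.join_cons_cons, ih', PySem.Chars.join_cons_cons]
      simp

-- the state B's fold reaches on input l, characterised via pvSplit
def pvStateOf (l : List Char) : List Char × List Char × List Char × Nat :=
  match (pvSplit l).reverse with
  | [] => ([], [], [], 0)
  | [c0] => ([], [], c0, 0)
  | [c0, v] => ([], v, c0, 1)
  | c0 :: v :: r1 :: r => (PySem.Chars.join ['-'] (r1 :: r).reverse, v, c0, (r1 :: r).length + 1)

theorem pv_foldl_stepB (l : List Char) :
    List.foldl pvStepB ([], [], [], 0) l = pvStateOf l := by
  induction l using List.reverseRecOn with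
  | nil => rfl
  | append_singleton l c ih =>
    rw [List.foldl_append, List.foldl_cons, List.foldl_nil, ih]
    cases hrs : (pvSplit l).reverse with
    | nil => exact absurd (by simpa using congrArg List.reverse hrs) (pvSplit_ne_nil l)
    | cons c0 t =>
      by_cases hc : c = '-'
      · subst hc
        have hnew : (pvSplit (l ++ ['-'])).reverse = [] :: c0 :: t := by
          rw [pvSplit_snoc_sep, List.reverse_append, hrs]; rfl
        cases t with
        | nil =>
          have h1 : pvStateOf l = ([], [], c0, 0) := by unfold pvStateOf; rw [hrs]
          have h2 : pvStateOf (l ++ ['-']) = ([], c0, [], 1) := by unfold pvStateOf; rw [hnew]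
          rw [h1, h2]; simp [pvStepB]
        | cons v t2 =>
          cases t2 with
          | nil =>
            have h1 : pvStateOf l = ([], v, c0, 1) := by unfold pvStateOf; rw [hrs]
            have h2 : pvStateOf (l ++ ['-']) = (v, c0, [], 2) := by
              unfold pvStateOf; rw [hnew]
              simp [PySem.Chars.join_singleton]
            rw [h1, h2]; simp [pvStepB]
          | cons r1 r2 =>
            have h1 : pvStateOf l
                = (PySem.Chars.join ['-'] (r1 :: r2).reverse, v, c0, (r1 :: r2).length + 1) := by
              unfold pvStateOf; rw [hrs]
            have h2 : pvStateOf (l ++ ['-'])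
                = (PySem.Chars.join ['-'] (v :: r1 :: r2).reverse, c0, [], (v :: r1 :: r2).length + 1) := by
              unfold pvStateOf; rw [hnew]
            rw [h1, h2]
            simp only [pvStepB, reduceIte]
            have hk : 2 ≤ (r1 :: r2).length + 1 := by simp
            rw [if_pos hk]
            rw [show (v :: r1 :: r2).reverse = (r1 :: r2).reverse ++ [v] from by simp,
                pv_join_snoc _ _ (by simp)]
            simp
      · have hnew : (pvSplit (l ++ [c])).reverse = (c0 ++ [c]) :: t := by
          rw [pvSplit_snoc l c hc, pvMapLast_reverse, hrs]; rfl
        cases t with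
        | nil =>
          have h1 : pvStateOf l = ([], [], c0, 0) := by unfold pvStateOf; rw [hrs]
          have h2 : pvStateOf (l ++ [c]) = ([], [], c0 ++ [c], 0) := by unfold pvStateOf; rw [hnew]
          rw [h1, h2]; simp [pvStepB, hc]
        | cons v t2 =>
          cases t2 with
          | nil =>
            have h1 : pvStateOf l = ([], v, c0, 1) := by unfold pvStateOf; rw [hrs]
            have h2 : pvStateOf (l ++ [c]) = ([], v, c0 ++ [c], 1) := by unfold pvStateOf; rw [hnew]
            rw [h1, h2]; simp [pvStepB, hc]
          | cons r1 r2 =>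
            have h1 : pvStateOf l
                = (PySem.Chars.join ['-'] (r1 :: r2).reverse, v, c0, (r1 :: r2).length + 1) := by
              unfold pvStateOf; rw [hrs]
            have h2 : pvStateOf (l ++ [c])
                = (PySem.Chars.join ['-'] (r1 :: r2).reverse, v, c0 ++ [c], (r1 :: r2).length + 1) := by
              unfold pvStateOf; rw [hnew]
            rw [h1, h2]; simp [pvStepB, hc]

theorem pv_pyGet_neg_one (xs : List (List Char)) (a b : List Char) :
    PySem.List.pyGet? (xs ++ [a, b]) (-1) = some b := by
  have hidx : PySem.List.pyIdx? (xs ++ [a, b]).length (-1) = some (xs.length + 1) := by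
    simp only [PySem.List.pyIdx?]
    norm_num
  simp only [PySem.List.pyGet?, hidx]
  simp

theorem pv_pyGet_neg_two (xs : List (List Char)) (a b : List Char) :
    PySem.List.pyGet? (xs ++ [a, b]) (-2) = some a := by
  have hidx : PySem.List.pyIdx? (xs ++ [a, b]).length (-2) = some xs.length := by
    simp only [PySem.List.pyIdx?]
    norm_num
    omega
  simp only [PySem.List.pyGet?, hidx]
  simp

-- the core: A's split/join tail equals B's fold tail on any base
theorem pv_core_eq (base : List Char) :
    (if (PySem.Chars.splitOn base ['-']).length < 3 then ((none, none) : Option String × Option String)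
     else
       (some (String.ofList (PySem.Chars.join ['-'] (PySem.List.slice (PySem.Chars.splitOn base ['-']) none (some (-2))))),
        some (String.ofList ((PySem.List.pyGet? (PySem.Chars.splitOn base ['-']) (-2)).getD [] ++ ['-'] ++
                             (PySem.List.pyGet? (PySem.Chars.splitOn base ['-']) (-1)).getD []))))
    = (match List.foldl pvStepB ([], [], [], 0) base with
       | (name, ver, cur, k) =>
         if k < 2 then (none, none)
         else (some (String.ofList name), some (String.ofList (ver ++ '-' :: cur)))) := by
  rw [pv_splitOn_eq, pv_foldl_stepB]
  cases hrs : (pvSplit base).reverse with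
  | nil => exact absurd (by simpa using congrArg List.reverse hrs) (pvSplit_ne_nil base)
  | cons c0 t =>
    have hfs : pvSplit base = (c0 :: t).reverse := by simpa using congrArg List.reverse hrs
    cases t with
    | nil =>
      have hst : pvStateOf base = ([], [], c0, 0) := by unfold pvStateOf; rw [hrs]
      rw [hfs, hst]; simp
    | cons v t2 =>
      cases t2 with
      | nil =>
        have hst : pvStateOf base = ([], v, c0, 1) := by unfold pvStateOf; rw [hrs]
        rw [hfs, hst]; simp
      | cons r1 r =>
        have hst : pvStateOf base
            = (PySem.Chars.join ['-'] (r1 :: r).reverse, v, c0, (r1 :: r).length + 1) := by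
          unfold pvStateOf; rw [hrs]
        rw [hfs, hst]
        have hsh : (c0 :: v :: r1 :: r).reverse = (r1 :: r).reverse ++ [v, c0] := by simp
        rw [hsh]
        have hslice2 : PySem.List.slice ((r1 :: r).reverse ++ [v, c0]) none (some (-2 : Int))
            = (r1 :: r).reverse := by
          rw [show (-2 : Int) = -((2 : Nat) : Int) from rfl]
          rw [pv_slice_neg_eq _ 2 (by omega) (by simp)]
          rw [show ((r1 :: r).reverse ++ [v, c0]).length - 2 = (r1 :: r).reverse.length by simp]
          exact List.take_left
        rw [if_neg (by simp), hslice2, pv_pyGet_neg_one, pv_pyGet_neg_two]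
        have hk : ¬ ((r1 :: r).length + 1 < 2) := by simp
        simp only [if_neg hk]
        simp

-- ===== VERDICT (by name: the statement is the Claim_ definition above) =====
theorem parse_package_filename_spec : Claim_equal_parse_package_filename := by
  intro filename _
  unfold Spec_parse_package_filename parse_package_filename parse_package_filename_alt
  rw [pv_stripExt_eq filename.toList pvExts (by decide)]
  cases hb : pvFirstExtB filename.toList pvExts with
  | none => rfl
  | some ext =>
    simp only [Option.map_some]
    rw [pv_stripArch_eq _ pvArchs (by decide)]
    exact pv_core_eq _
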